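-- pv_equiv track=rewrite | github.com/shiftshapr/bitcoinGames | Los Pixales/analysisDigits.py | count_digits_in_positions
-- ===== SOURCE A (Python) =====
-- def count_digits_in_positions(numbers):
--     max_length = max(len(num) for num in numbers)
--     digit_counts = {f"D{i}": {str(d): 0 for d in range(10)} for i in range(max_length)}
--
--     for num in numbers:
--         reversed_num = num[::-1]  # Reverse the number to start counting from the end
--         for i, digit in enumerate(reversed_num):
--             digit_counts[f"D{i}"][digit] += 1
--
--     return digit_counts
-- ===== SOURCE B (Python) =====
-- def _column_counts(numbers, i):
--     counts = {str(d): 0 for d in range(10)}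
--     for num in numbers:
--         if i < len(num):
--             counts[num[-1 - i]] += 1
--     return counts
--
--
-- def count_digits_in_positions(numbers):
--     max_length = max(len(num) for num in numbers)
--     return {f"D{i}": _column_counts(numbers, i) for i in range(max_length)}
-- ===== Notes on version B (the rewrite author's own statement) =====
-- stated objective: alternative
-- what changed: Column-oriented rewrite: instead of prebuilding the whole position table and accumulating row by row over each reversed number, B loops over positions and tallies each position's column with a fresh per-position counter (indexing num[-1-i] directly).
import Mathlib
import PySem

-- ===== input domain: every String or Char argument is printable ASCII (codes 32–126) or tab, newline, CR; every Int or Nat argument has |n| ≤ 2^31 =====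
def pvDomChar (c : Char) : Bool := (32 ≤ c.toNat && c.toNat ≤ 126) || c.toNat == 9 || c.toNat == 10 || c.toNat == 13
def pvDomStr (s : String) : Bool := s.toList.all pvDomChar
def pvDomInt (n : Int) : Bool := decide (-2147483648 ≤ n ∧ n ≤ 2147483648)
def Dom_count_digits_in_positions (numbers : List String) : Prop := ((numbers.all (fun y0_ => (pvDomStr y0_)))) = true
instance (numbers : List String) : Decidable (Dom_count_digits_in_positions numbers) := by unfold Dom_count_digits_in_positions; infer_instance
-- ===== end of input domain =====

-- B is a column-oriented rewrite of A (per-position fresh counters instead of a prebuilt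
-- table accumulated row by row); return values only, neither program mutates its input.

-- ===== PORT A =====
-- literal transliteration of Source A: max over lengths, prebuilt table {Di: {d: 0}}, then
-- for each num, enumerate(num[::-1]) and increment digit_counts[f"D{i}"][digit].
def count_digits_in_positions (numbers : List String) : List (String × List (String × Int)) :=
  let max_length : Int := (PySem.List.max? (numbers.map (fun num => PySem.Str.len num)) (fun x => x)).getD 0
  let digit_counts : PySem.Dict String (PySem.Dict String Int) :=
    ⟨(PySem.List.pyRange 0 max_length).map (fun i =>
      ("D" ++ PySem.Int.toStr i,
       (⟨(PySem.List.pyRange 0 10).map (fun d => (PySem.Int.toStr d, (0 : Int)))⟩ : PySem.Dict String Int)))⟩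
  let final := numbers.foldl (fun (dc : PySem.Dict String (PySem.Dict String Int)) num =>
    let reversed_num : List Char := (PySem.List.slice? num.toList none none (-1)).getD []
    (PySem.List.enumerate reversed_num).foldl (fun (dc : PySem.Dict String (PySem.Dict String Int)) p =>
      -- digit_counts[f"D{i}"][digit] += 1 ; under Pre_ both keys are present, so the
      -- modify defaults are never consulted there (Python raises KeyError otherwise)
      dc.modify ("D" ++ PySem.Int.toStr p.1) ⟨[]⟩
        (fun inner => inner.modify (String.ofList [p.2]) 0 (fun x => x + 1))) dc) digit_counts
  final.items.map (fun p => (p.1, p.2.items))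

-- ===== PORT B =====
-- literal transliteration of Source B's _column_counts: fresh {str(d): 0} counter, one pass
-- over numbers tallying num[-1-i]; the `none` arm is unreachable under the guard i < len(num).
def pvColumnCounts (numbers : List String) (i : Int) : PySem.Dict String Int :=
  numbers.foldl (fun counts num =>
    if i < PySem.Str.len num then
      match PySem.Str.pyGet? num (-1 - i) with
      | some c => counts.modify (String.ofList [c]) 0 (fun x => x + 1)
      | none => counts
    else counts)
    ⟨(PySem.List.pyRange 0 10).map (fun d => (PySem.Int.toStr d, (0 : Int)))⟩

def count_digits_in_positions_alt (numbers : List String) : List (String × List (String × Int)) :=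
  let max_length : Int := (PySem.List.max? (numbers.map (fun num => PySem.Str.len num)) (fun x => x)).getD 0
  (PySem.List.pyRange 0 max_length).map (fun i =>
    ("D" ++ PySem.Int.toStr i, (pvColumnCounts numbers i).items))

-- ===== PRECONDITION & SPEC =====
-- Pre_ excludes the empty list (Python A raises ValueError in max) and lists containing a
-- non-digit character (Python A raises KeyError on the increment); both Pythons raise there.
def Pre_count_digits_in_positions (numbers : List String) : Prop :=
  numbers ≠ [] ∧ (numbers.all (fun s => s.toList.all (fun c => c.isDigit))) = true
instance (numbers : List String) : Decidable (Pre_count_digits_in_positions numbers) := by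
  unfold Pre_count_digits_in_positions; infer_instance
def pvWitness_count_digits_in_positions : List String := ["12", "305"]

def Spec_count_digits_in_positions (numbers : List String) (out : List (String × List (String × Int))) : Prop := out = count_digits_in_positions_alt numbers
instance (numbers : List String) (out : List (String × List (String × Int))) : Decidable (Spec_count_digits_in_positions numbers out) := by unfold Spec_count_digits_in_positions; infer_instance

-- ===== CLAIM (what is proved, stated in full; the proofs are below) =====
def Claim_equal_count_digits_in_positions : Prop := ∀ (numbers : List String), Dom_count_digits_in_positions numbers → Pre_count_digits_in_positions numbers → Spec_count_digits_in_positions numbers (count_digits_in_positions numbers)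

-- ===== LEMMAS AND PROOFS =====

-- value of a digit-character list; inverts Nat.toDigits 10, giving its injectivity
def pvVal (ds : List Char) : Nat := ds.foldl (fun a c => a * 10 + (c.toNat - '0'.toNat)) 0

theorem pvCore_append (f n : Nat) (ds : List Char) :
    Nat.toDigitsCore 10 f n ds = Nat.toDigitsCore 10 f n [] ++ ds := by
  induction f generalizing n ds with
  | zero => simp [Nat.toDigitsCore]
  | succ f ih =>
    simp only [Nat.toDigitsCore]
    by_cases h : n / 10 = 0
    · simp [h]
    · simp only [if_neg h]
      rw [ih (n/10) (Nat.digitChar (n % 10) :: ds), ih (n/10) [Nat.digitChar (n % 10)]]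
      simp

theorem pvDigitChar_val (k : Nat) (hk : k < 10) : (Nat.digitChar k).toNat - '0'.toNat = k := by
  interval_cases k <;> decide

theorem pvVal_core (f n : Nat) (h : n < 10 ^ f) : pvVal (Nat.toDigitsCore 10 f n []) = n := by
  induction f generalizing n with
  | zero => simp at h; simp [h, Nat.toDigitsCore, pvVal]
  | succ f ih =>
    have hd := pvDigitChar_val (n % 10) (Nat.mod_lt _ (by norm_num))
    simp only [Nat.toDigitsCore]
    by_cases h0 : n / 10 = 0
    · rw [if_pos h0]
      simp only [pvVal, List.foldl_cons, List.foldl_nil, Nat.zero_mul, Nat.zero_add]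
      rw [hd]
      omega
    · rw [if_neg h0, pvCore_append]
      have hlt : n / 10 < 10 ^ f := by
        rw [Nat.div_lt_iff_lt_mul (by norm_num)]
        calc n < 10 ^ (f+1) := h
        _ = 10 ^ f * 10 := by ring
      unfold pvVal
      simp only [List.foldl_append, List.foldl_cons, List.foldl_nil]
      rw [show List.foldl (fun a c => a * 10 + (c.toNat - '0'.toNat)) 0 (Nat.toDigitsCore 10 f (n/10) []) = pvVal (Nat.toDigitsCore 10 f (n/10) []) from rfl]
      rw [ih _ hlt, hd]
      omega

theorem pvToDigits_inj {m n : Nat} (h : Nat.toDigits 10 m = Nat.toDigits 10 n) : m = n := by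
  have hm : pvVal (Nat.toDigits 10 m) = m := pvVal_core (m+1) m (by
    calc m < 10 ^ m := Nat.lt_pow_self (by norm_num)
    _ ≤ 10 ^ (m+1) := Nat.pow_le_pow_right (by norm_num) (by omega))
  have hn : pvVal (Nat.toDigits 10 n) = n := pvVal_core (n+1) n (by
    calc n < 10 ^ n := Nat.lt_pow_self (by norm_num)
    _ ≤ 10 ^ (n+1) := Nat.pow_le_pow_right (by norm_num) (by omega))
  rw [h] at hm
  omega

theorem pvKey_inj {i j : Int} (hi : 0 ≤ i) (hj : 0 ≤ j)
    (h : "D" ++ PySem.Int.toStr i = "D" ++ PySem.Int.toStr j) : i = j := by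
  have h2 : ("D" ++ PySem.Int.toStr i).toList = ("D" ++ PySem.Int.toStr j).toList := by rw [h]
  rw [String.toList_append, String.toList_append, PySem.Int.toList_toStr, PySem.Int.toList_toStr] at h2
  have h3 : PySem.Int.toChars i = PySem.Int.toChars j := by simpa using h2
  unfold PySem.Int.toChars at h3
  rw [if_neg (by omega), if_neg (by omega)] at h3
  have := pvToDigits_inj h3
  omega

-- lookup / insert on a table whose entries are ("D" ++ i, v i) for i in a list of nonnegatives
theorem pvFind_map (I : List Int) (v : Int → PySem.Dict String Int) (j : Int)
    (hI : ∀ i ∈ I, 0 ≤ i) (hj0 : 0 ≤ j) (hj : j ∈ I) :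
    List.find? (fun p => p.1 == ("D" ++ PySem.Int.toStr j))
        (I.map (fun i => ("D" ++ PySem.Int.toStr i, v i)))
      = some ("D" ++ PySem.Int.toStr j, v j) := by
  induction I with
  | nil => simp at hj
  | cons i I ih =>
    simp only [List.map_cons, List.find?_cons]
    by_cases he : ("D" ++ PySem.Int.toStr i) = ("D" ++ PySem.Int.toStr j)
    · have : i = j := pvKey_inj (hI i (by simp)) hj0 he
      subst this
      simp
    · have hb : (("D" ++ PySem.Int.toStr i) == ("D" ++ PySem.Int.toStr j)) = false := by
        simp [he]
      rw [hb]
      exact ih (fun x hx => hI x (by simp [hx])) (by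
        rcases List.mem_cons.mp hj with h | h
        · exact absurd (by rw [h]) he
        · exact h)

theorem pvInsert_map (I : List Int) (v : Int → PySem.Dict String Int) (j : Int)
    (w : PySem.Dict String Int) (hI : ∀ i ∈ I, 0 ≤ i) (hj0 : 0 ≤ j) (hj : j ∈ I) :
    (PySem.Dict.mk (I.map (fun i => ("D" ++ PySem.Int.toStr i, v i)))).insert
        ("D" ++ PySem.Int.toStr j) w
      = ⟨I.map (fun i => ("D" ++ PySem.Int.toStr i, if i = j then w else v i))⟩ := by
  have hc : (PySem.Dict.mk (I.map (fun i => ("D" ++ PySem.Int.toStr i, v i)))).contains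
      ("D" ++ PySem.Int.toStr j) = true := by
    simp only [PySem.Dict.contains, List.any_map, List.any_eq_true]
    exact ⟨j, hj, by simp⟩
  simp only [PySem.Dict.insert, hc, if_pos]
  congr 1
  rw [List.map_map]
  apply List.map_congr_left
  intro i hi
  by_cases he : i = j
  · subst he; simp
  · have hne : ("D" ++ PySem.Int.toStr i) ≠ ("D" ++ PySem.Int.toStr j) := by
      intro hcontra; exact he (pvKey_inj (hI i hi) hj0 hcontra)
    simp [Function.comp, hne, he]

theorem pvModify_table (m j : Int) (v : Int → PySem.Dict String Int)
    (dflt : PySem.Dict String Int) (f : PySem.Dict String Int → PySem.Dict String Int)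
    (hj0 : 0 ≤ j) (hjm : j < m) :
    (PySem.Dict.mk ((PySem.List.pyRange 0 m).map (fun i => ("D" ++ PySem.Int.toStr i, v i)))).modify
        ("D" ++ PySem.Int.toStr j) dflt f
      = ⟨(PySem.List.pyRange 0 m).map (fun i => ("D" ++ PySem.Int.toStr i, if i = j then f (v i) else v i))⟩ := by
  have hI : ∀ i ∈ PySem.List.pyRange 0 m, (0:Int) ≤ i := fun i hi =>
    (PySem.List.mem_pyRange_one.mp hi).1
  have hj : j ∈ PySem.List.pyRange 0 m := PySem.List.mem_pyRange_one.mpr ⟨hj0, hjm⟩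
  simp only [PySem.Dict.modify, PySem.Dict.getD, PySem.Dict.get?]
  rw [pvFind_map _ v j hI hj0 hj]
  simp only [Option.map_some, Option.getD_some]
  rw [pvInsert_map _ v j _ hI hj0 hj]
  congr 1
  apply List.map_congr_left
  intro i hi
  by_cases he : i = j
  · subst he; simp
  · simp [he]

-- folding A's nested increments over a pair list distributes to each column
theorem pvFoldPairs (E : List (Int × Char)) (m : Int) (v : Int → PySem.Dict String Int)
    (hE : ∀ p ∈ E, 0 ≤ p.1 ∧ p.1 < m) :
    E.foldl (fun (dc : PySem.Dict String (PySem.Dict String Int)) p =>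
        dc.modify ("D" ++ PySem.Int.toStr p.1) ⟨[]⟩
          (fun inner => inner.modify (String.ofList [p.2]) 0 (fun x => x + 1)))
      ⟨(PySem.List.pyRange 0 m).map (fun i => ("D" ++ PySem.Int.toStr i, v i))⟩
    = ⟨(PySem.List.pyRange 0 m).map (fun i => ("D" ++ PySem.Int.toStr i,
        E.foldl (fun c p => if p.1 = i then c.modify (String.ofList [p.2]) 0 (fun x => x + 1) else c) (v i)))⟩ := by
  induction E generalizing v with
  | nil => simp
  | cons p E ih =>
    simp only [List.foldl_cons]
    rw [pvModify_table m p.1 v _ _ (hE p (by simp)).1 (hE p (by simp)).2]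
    rw [ih (fun i => if i = p.1 then (v i).modify (String.ofList [p.2]) 0 (fun x => x + 1) else v i)
        (fun q hq => hE q (by simp [hq]))]
    congr 1
    apply List.map_congr_left
    intro i hi
    congr 1
    by_cases he : p.1 = i
    · simp [he, eq_comm]
    · simp [he, Ne.symm he]

-- the enumerate fold touches index i exactly once, iff i indexes into xs
theorem pvEnumFold (xs : List Char) (s i : Int) (c : PySem.Dict String Int)
    (g : Char → PySem.Dict String Int → PySem.Dict String Int) :
    (PySem.List.enumerate xs s).foldl (fun c p => if p.1 = i then g p.2 c else c) c
    = if s ≤ i ∧ i < s + xs.length then g (xs.getD (i - s).toNat 'a') c else c := by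
  induction xs generalizing s c with
  | nil => simp
  | cons x xs ih =>
    rw [PySem.List.enumerate_cons]
    simp only [List.foldl_cons]
    by_cases hs : s = i
    · subst hs
      rw [if_pos rfl, ih]
      rw [if_neg (by omega), if_pos (by simp only [List.length_cons]; omega)]
      simp
    · rw [if_neg hs, ih]
      by_cases hcond : s + 1 ≤ i ∧ i < s + 1 + xs.length
      · rw [if_pos hcond, if_pos (by simp only [List.length_cons]; push_cast; omega)]
        congr 1
        have h1 : (i - s).toNat = (i - (s+1)).toNat + 1 := by omega
        rw [h1]
        simp
      · rw [if_neg hcond, if_neg (by simp only [List.length_cons]; push_cast; omega)]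

-- num[-1-i] is the i-th character of the reversed string
theorem pvGet_rev (num : String) (i : Int) (h0 : 0 ≤ i) (hl : i < (num.toList.length : Int)) :
    PySem.Str.pyGet? num (-1 - i) = some (num.toList.reverse.getD i.toNat 'a') := by
  have hb : PySem.Str.pyGet? num (-1 - i) = PySem.List.pyGet? num.toList (-1 - i) := by simp
  rw [hb]
  simp only [PySem.List.pyGet?, PySem.List.pyIdx?]
  rw [if_neg (by omega), if_pos (by omega)]
  have hn : num.toList.length - ((-(-1 - i)).toNat) = num.toList.length - 1 - i.toNat := by omega
  rw [hn]
  have hr : i.toNat < num.toList.length := by omega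
  rw [List.getD_eq_getElem?_getD, List.getElem?_reverse hr]
  have hrange : num.toList.length - 1 - i.toNat < num.toList.length := by omega
  rw [List.getElem?_eq_getElem hrange]
  simp

-- one number applied to the table = per-column conditional increment
theorem pvStep (num : String) (m : Int) (v : Int → PySem.Dict String Int)
    (hm : PySem.Str.len num ≤ m) :
    (PySem.List.enumerate ((PySem.List.slice? num.toList none none (-1)).getD [])).foldl
        (fun (dc : PySem.Dict String (PySem.Dict String Int)) p =>
          dc.modify ("D" ++ PySem.Int.toStr p.1) ⟨[]⟩
            (fun inner => inner.modify (String.ofList [p.2]) 0 (fun x => x + 1)))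
        ⟨(PySem.List.pyRange 0 m).map (fun i => ("D" ++ PySem.Int.toStr i, v i))⟩
    = ⟨(PySem.List.pyRange 0 m).map (fun i => ("D" ++ PySem.Int.toStr i,
        if i < PySem.Str.len num then
          match PySem.Str.pyGet? num (-1 - i) with
          | some c => (v i).modify (String.ofList [c]) 0 (fun x => x + 1)
          | none => v i
        else v i))⟩ := by
  rw [PySem.List.slice?_none_none_neg_one]
  simp only [Option.getD_some]
  rw [PySem.Str.len_eq] at hm
  rw [pvFoldPairs _ m v (by
    intro p hp
    rcases List.mem_iff_getElem.mp hp with ⟨k, hk, hpk⟩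
    rw [PySem.List.getElem_enumerate] at hpk
    have hk' : k < num.toList.reverse.length := by
      simpa [PySem.List.length_enumerate] using hk
    subst hpk
    simp only [zero_add]
    constructor
    · omega
    · calc (k : Int) < num.toList.reverse.length := by exact_mod_cast hk'
      _ = (num.toList.length : Int) := by simp
      _ ≤ m := hm)]
  congr 1
  apply List.map_congr_left
  intro i hi
  have hi0 : 0 ≤ i := (PySem.List.mem_pyRange_one.mp hi).1
  congr 1
  rw [pvEnumFold num.toList.reverse 0 i (v i) (fun ch c => c.modify (String.ofList [ch]) 0 (fun x => x + 1))]
  rw [PySem.Str.len_eq]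
  by_cases hc : i < (num.toList.length : Int)
  · rw [if_pos (by simp only [List.length_reverse, zero_add]; omega), if_pos hc]
    rw [pvGet_rev num i hi0 hc]
    simp only [Int.sub_zero]
  · rw [if_neg (by simp only [List.length_reverse, zero_add]; omega), if_neg hc]

-- row-by-row accumulation over the whole table = per-column accumulation
theorem pvMain (numbers : List String) (m : Int) (v : Int → PySem.Dict String Int)
    (h : ∀ num ∈ numbers, PySem.Str.len num ≤ m) :
    numbers.foldl (fun (dc : PySem.Dict String (PySem.Dict String Int)) num =>
        (PySem.List.enumerate ((PySem.List.slice? num.toList none none (-1)).getD [])).foldl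
          (fun (dc : PySem.Dict String (PySem.Dict String Int)) p =>
            dc.modify ("D" ++ PySem.Int.toStr p.1) ⟨[]⟩
              (fun inner => inner.modify (String.ofList [p.2]) 0 (fun x => x + 1))) dc)
      ⟨(PySem.List.pyRange 0 m).map (fun i => ("D" ++ PySem.Int.toStr i, v i))⟩
    = ⟨(PySem.List.pyRange 0 m).map (fun i => ("D" ++ PySem.Int.toStr i,
        numbers.foldl (fun counts num =>
          if i < PySem.Str.len num then
            match PySem.Str.pyGet? num (-1 - i) with
            | some c => counts.modify (String.ofList [c]) 0 (fun x => x + 1)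
            | none => counts
          else counts) (v i)))⟩ := by
  induction numbers generalizing v with
  | nil => simp
  | cons num rest ih =>
    simp only [List.foldl_cons]
    rw [pvStep num m v (h num (by simp))]
    exact ih _ (fun x hx => h x (by simp [hx]))

theorem pvMaxLen (numbers : List String) (num : String) (hmem : num ∈ numbers) :
    PySem.Str.len num ≤ (PySem.List.max? (numbers.map (fun num => PySem.Str.len num)) (fun x => x)).getD 0 := by
  cases hmax : PySem.List.max? (numbers.map (fun num => PySem.Str.len num)) (fun x => x) with
  | none =>
    rw [PySem.List.max?_eq_none_iff] at hmax
    have hnil : numbers = [] := by simpa using hmax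
    subst hnil
    simp at hmem
  | some mx =>
    have := PySem.List.max?_isMax hmax (PySem.Str.len num) (List.mem_map.mpr ⟨num, hmem, rfl⟩)
    simpa using this

-- ===== VERDICT (by name: the statement is the Claim_ definition above) =====
theorem count_digits_in_positions_spec : Claim_equal_count_digits_in_positions := by
  intro numbers _ _
  unfold Spec_count_digits_in_positions count_digits_in_positions count_digits_in_positions_alt pvColumnCounts
  dsimp only
  rw [pvMain numbers _ _ (fun num hmem => pvMaxLen numbers num hmem)]
  simp [List.map_map, Function.comp]
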